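-- pv_equiv track=rewrite | github.com/sschott20/Competitive-Programming | Codeforces Round 903 (Div. 3)/B.py | solve
-- ===== SOURCE A (Python) =====
-- def solve(a,b,c):
--     target = min(a,b,c)
--     if a == b and a == c:
--         return "YES"
--     acc = 0
--     for i in range(0, 3):
--         if a > target:
--             a -= target
--             acc += 1
--         if b > target:
--             b -= target
--             acc += 1
--         if c > target:
--             c -= target
--             acc += 1
--     if a == b and a == c and acc <= 3:
--         return "YES"
--
--
--     return "NO"
-- ===== SOURCE B (Python) =====
-- def solve(a, b, c):
--     # Closed-form: with m = min > 0, a variable can be reduced to m iff it is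
--     # q*m for q in 1..4 (q-1 subtractions); total subtractions must be <= 3.
--     if a == b == c:
--         return "YES"
--     m = min(a, b, c)
--     if m <= 0:
--         return "NO"
--     total = 0
--     for x in (a, b, c):
--         q, r = divmod(x, m)
--         if r != 0 or q > 4:
--             return "NO"
--         total += q - 1
--     return "YES" if total <= 3 else "NO"
-- ===== Notes on version B (the rewrite author's own statement) =====
-- stated objective: alternative
-- what changed: Replaced A's 3-round loop simulation of repeated subtractions with a closed-form arithmetic test: each value must be an exact multiple q*min with q in 1..4 (checked by one divmod), and the total number of needed subtractions sum(q-1) must be at most 3.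
import Mathlib
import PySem

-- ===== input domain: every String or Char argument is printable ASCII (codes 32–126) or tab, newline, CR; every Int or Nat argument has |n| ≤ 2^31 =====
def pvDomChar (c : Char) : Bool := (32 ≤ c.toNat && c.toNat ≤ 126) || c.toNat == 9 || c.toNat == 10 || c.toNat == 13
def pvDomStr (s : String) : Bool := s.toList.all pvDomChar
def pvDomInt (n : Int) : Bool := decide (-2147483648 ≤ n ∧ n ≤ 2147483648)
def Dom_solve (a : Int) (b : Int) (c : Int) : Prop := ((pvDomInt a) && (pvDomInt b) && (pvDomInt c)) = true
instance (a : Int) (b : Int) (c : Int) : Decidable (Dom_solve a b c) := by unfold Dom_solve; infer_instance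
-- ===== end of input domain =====

-- B replaces A's 3-round subtraction simulation by a closed-form divmod test (objective "alternative").

-- ===== PORT A =====
-- the body of A's 'for i in range(0, 3)' loop: three sequential ifs over the state (a, b, c, acc)
def roundA (target : Int) (st : Int × Int × Int × Int) : Int × Int × Int × Int :=
  let p1 := if st.1 > target then (st.1 - target, st.2.2.2 + 1) else (st.1, st.2.2.2)
  let p2 := if st.2.1 > target then (st.2.1 - target, p1.2 + 1) else (st.2.1, p1.2)
  let p3 := if st.2.2.1 > target then (st.2.2.1 - target, p2.2 + 1) else (st.2.2.1, p2.2)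
  (p1.1, p2.1, p3.1, p3.2)

def solve (a : Int) (b : Int) (c : Int) : String :=
  let target := min (min a b) c
  if a = b ∧ a = c then "YES"
  else
    let s := (PySem.List.pyRange 0 3 1).foldl (fun st _ => roundA target st) (a, b, c, 0)
    if s.1 = s.2.1 ∧ s.1 = s.2.2.1 ∧ s.2.2.2 ≤ 3 then "YES" else "NO"

-- ===== PORT B =====
-- Source B's per-variable body: q, r = divmod(x, m); early 'return "NO"' when r ≠ 0 or q > 4
-- is ported as an Option (none = the early return fired), else the quotient q.
def qOf (m x : Int) : Option Int :=
  let q := PySem.Int.floordiv x m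
  let r := PySem.Int.mod x m
  if r ≠ 0 ∨ q > 4 then none else some q

def solve_alt (a : Int) (b : Int) (c : Int) : String :=
  if a = b ∧ a = c then "YES"
  else
    let m := min (min a b) c
    if m ≤ 0 then "NO"
    else
      match qOf m a with
      | none => "NO"
      | some qa =>
        match qOf m b with
        | none => "NO"
        | some qb =>
          match qOf m c with
          | none => "NO"
          | some qc => if qa - 1 + (qb - 1) + (qc - 1) ≤ 3 then "YES" else "NO"

-- ===== PRECONDITION & SPEC =====
def Spec_solve (a : Int) (b : Int) (c : Int) (out : String) : Prop := out = solve_alt a b c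
instance (a : Int) (b : Int) (c : Int) (out : String) : Decidable (Spec_solve a b c out) := by unfold Spec_solve; infer_instance

-- ===== CLAIM (what is proved, stated in full; the proofs are below) =====
def Claim_equal_solve : Prop := ∀ (a : Int) (b : Int) (c : Int), Dom_solve a b c → Spec_solve a b c (solve a b c)

-- ===== LEMMAS AND PROOFS =====

-- one subtraction step on a single variable, its count, three iterations of each
def stepA (m x : Int) : Int := if x > m then x - m else x
def cntA (m x : Int) : Int := if x > m then 1 else 0
def s3 (m x : Int) : Int := stepA m (stepA m (stepA m x))
def c3 (m x : Int) : Int := cntA m x + cntA m (stepA m x) + cntA m (stepA m (stepA m x))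

theorem roundA_eq (m a b c acc : Int) :
    roundA m (a, b, c, acc) =
      (stepA m a, stepA m b, stepA m c, acc + cntA m a + cntA m b + cntA m c) := by
  simp only [roundA, stepA, cntA]
  split_ifs <;> simp

theorem foldl_rounds (m a b c : Int) :
    (PySem.List.pyRange 0 3 1).foldl (fun st _ => roundA m st) (a, b, c, 0) =
      (s3 m a, s3 m b, s3 m c, c3 m a + c3 m b + c3 m c) := by
  rw [show PySem.List.pyRange 0 3 1 = [0, 1, 2] from by decide]
  simp only [List.foldl, roundA_eq, s3, c3]
  refine Prod.ext rfl (Prod.ext rfl (Prod.ext rfl ?_))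
  ring

theorem qOf_some (m x q : Int) (hm : 0 < m) (h : qOf m x = some q) :
    x = q * m ∧ q ≤ 4 := by
  simp only [qOf] at h
  split_ifs at h with hif
  push_neg at hif
  obtain ⟨hr, hq⟩ := hif
  injection h with h
  subst h
  have := PySem.Int.floordiv_mul_add_mod x m
  exact ⟨by omega, hq⟩

theorem qOf_of_mul (m q : Int) (hm : 0 < m) (h1 : 1 ≤ q) (h4 : q ≤ 4) :
    qOf m (q * m) = some q := by
  have hd : PySem.Int.floordiv (q * m) m = q := by
    rw [PySem.Int.floordiv_eq_ediv_of_pos hm]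
    exact Int.mul_ediv_cancel q (by omega)
  have hr : PySem.Int.mod (q * m) m = 0 := by
    have := PySem.Int.floordiv_mul_add_mod (q * m) m
    rw [hd] at this; omega
  simp [qOf, hd, hr, h4, not_lt]

theorem q_ge_one (m x q : Int) (hm : 0 < m) (hx : m ≤ x) (h : x = q * m) : 1 ≤ q := by
  by_contra hq
  push_neg at hq
  have : q * m ≤ 0 * m := by
    apply mul_le_mul_of_nonneg_right (by omega) (by omega)
  simp at this; omega

-- for a multiple x = q*m, q ∈ [1,4]: the three-round simulation reaches m in q-1 counted steps
theorem s3_c3_of_mul (m q : Int) (hm : 0 < m) (h1 : 1 ≤ q) (h4 : q ≤ 4) :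
    s3 m (q * m) = m ∧ c3 m (q * m) = q - 1 := by
  interval_cases q <;>
    simp only [s3, c3, stepA, cntA] <;> split_ifs <;> constructor <;> omega

-- for a non-multiple (or too-large multiple), the simulation ends away from m
theorem s3_ne_of_not_mul (m x : Int) (hm : 0 < m) (hx : m ≤ x)
    (h : ∀ q : Int, 1 ≤ q → q ≤ 4 → x ≠ q * m) : s3 m x ≠ m := by
  simp only [s3, stepA]
  split_ifs <;> intro he <;>
    first
      | exact h 1 (by omega) (by omega) (by omega)
      | exact h 2 (by omega) (by omega) (by omega)
      | exact h 3 (by omega) (by omega) (by omega)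
      | exact h 4 (by omega) (by omega) (by omega)

theorem qOf_none_s3_ne (m x : Int) (hm : 0 < m) (hx : m ≤ x) (h : qOf m x = none) :
    s3 m x ≠ m := by
  apply s3_ne_of_not_mul m x hm hx
  intro q h1 h4 he
  rw [he, qOf_of_mul m q hm h1 h4] at h
  exact absurd h (by simp)

theorem s3_self (m : Int) : s3 m m = m := by
  simp [s3, stepA]

-- with m ≤ 0 and x > m the value only moves away from m
theorem s3_ne_of_nonpos (m x : Int) (hm : m ≤ 0) (hx : m < x) : s3 m x ≠ m := by
  simp only [s3, stepA]
  split_ifs <;> omega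

theorem solve_eq (a b c : Int) : solve a b c = solve_alt a b c := by
  unfold solve solve_alt
  by_cases habc : a = b ∧ a = c
  · simp only [if_pos habc]
  · simp only [if_neg habc, foldl_rounds]
    generalize hg : min (min a b) c = m
    have hle : m ≤ a ∧ m ≤ b ∧ m ≤ c := by omega
    have hmem : m = a ∨ m = b ∨ m = c := by omega
    clear hg
    have hmin_s3 : s3 m a = m ∨ s3 m b = m ∨ s3 m c = m := by
      rcases hmem with h | h | h
      · exact Or.inl (h ▸ s3_self m)
      · exact Or.inr (Or.inl (h ▸ s3_self m))
      · exact Or.inr (Or.inr (h ▸ s3_self m))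
    by_cases hm : m ≤ 0
    · -- some variable is strictly above m; its simulated value ends ≠ m while the min stays m
      rw [if_pos hm]
      obtain ⟨x, hxgt, hxeq⟩ : ∃ x, m < x ∧ (s3 m x = s3 m a ∨ s3 m x = s3 m b ∨ s3 m x = s3 m c) := by
        by_cases h2 : m < a
        · exact ⟨a, h2, Or.inl rfl⟩
        · by_cases h3 : m < b
          · exact ⟨b, h3, Or.inr (Or.inl rfl)⟩
          · exact ⟨c, by omega, Or.inr (Or.inr rfl)⟩
      have hne := s3_ne_of_nonpos m x hm hxgt
      rw [if_neg]
      rintro ⟨e1, e2, -⟩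
      rcases hxeq with h | h | h <;> rcases hmin_s3 with h' | h' | h' <;> omega
    · push_neg at hm
      rw [if_neg (by omega : ¬ m ≤ 0)]
      cases ha : qOf m a with
      | none =>
        have hne := qOf_none_s3_ne m a hm hle.1 ha
        have hcond : ¬(s3 m a = s3 m b ∧ s3 m a = s3 m c ∧
            c3 m a + c3 m b + c3 m c ≤ 3) := by
          rintro ⟨e1, e2, -⟩
          rcases hmin_s3 with h' | h' | h' <;> omega
        rw [if_neg hcond]
      | some qa =>
        cases hb : qOf m b with
        | none =>
          have hne := qOf_none_s3_ne m b hm hle.2.1 hb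
          have hcond : ¬(s3 m a = s3 m b ∧ s3 m a = s3 m c ∧
              c3 m a + c3 m b + c3 m c ≤ 3) := by
            rintro ⟨e1, e2, -⟩
            rcases hmin_s3 with h' | h' | h' <;> omega
          rw [if_neg hcond]
        | some qb =>
          cases hc : qOf m c with
          | none =>
            have hne := qOf_none_s3_ne m c hm hle.2.2 hc
            have hcond : ¬(s3 m a = s3 m b ∧ s3 m a = s3 m c ∧
                c3 m a + c3 m b + c3 m c ≤ 3) := by
              rintro ⟨e1, e2, -⟩
              rcases hmin_s3 with h' | h' | h' <;> omega
            rw [if_neg hcond]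
          | some qc =>
            obtain ⟨hea, ha4⟩ := qOf_some m a qa hm ha
            obtain ⟨heb, hb4⟩ := qOf_some m b qb hm hb
            obtain ⟨hec, hc4⟩ := qOf_some m c qc hm hc
            have ha1 := q_ge_one m a qa hm hle.1 hea
            have hb1 := q_ge_one m b qb hm hle.2.1 heb
            have hc1 := q_ge_one m c qc hm hle.2.2 hec
            obtain ⟨hsa, hca⟩ := s3_c3_of_mul m qa hm ha1 ha4
            obtain ⟨hsb, hcb⟩ := s3_c3_of_mul m qb hm hb1 hb4
            obtain ⟨hsc, hcc⟩ := s3_c3_of_mul m qc hm hc1 hc4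
            rw [← hea] at hsa hca
            rw [← heb] at hsb hcb
            rw [← hec] at hsc hcc
            rw [hsa, hsb, hsc, hca, hcb, hcc]
            by_cases hq : qa - 1 + (qb - 1) + (qc - 1) ≤ 3
            · rw [if_pos (by omega)]
              show "YES" = if qa - 1 + (qb - 1) + (qc - 1) ≤ 3 then "YES" else "NO"
              rw [if_pos hq]
            · rw [if_neg (by omega)]
              show "NO" = if qa - 1 + (qb - 1) + (qc - 1) ≤ 3 then "YES" else "NO"
              rw [if_neg hq]

-- ===== VERDICT (by name: the statement is the Claim_ definition above) =====
theorem solve_spec : Claim_equal_solve := by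
  intro a b c _
  unfold Spec_solve
  exact solve_eq a b c
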